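-- pv_equiv track=rewrite | github.com/MirkaIgor/Python-Course | hw-03/task02.py | invert_text
-- ===== SOURCE A (Python) =====
-- def invert_text(text: str):
--     lines = text.split('\n')
--     for ind_line,line in enumerate(lines):
--         words = line.split(' ')
--         for ind,word in enumerate(words):
--             words[ind] = word[::-1]
--         lines[ind_line] = ' '.join(words)
--     return '\n'.join(lines)
-- ===== SOURCE B (Python) =====
-- def invert_text(text: str):
--     # single left-to-right pass: collect each run of non-space/non-newline
--     # chars, flush it reversed when a delimiter (or the end) is reached
--     out = []
--     word = []
--     for ch in text:
--         if ch == ' ' or ch == '\n':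
--             out += word[::-1]
--             out.append(ch)
--             word = []
--         else:
--             word.append(ch)
--     out += word[::-1]
--     return ''.join(out)
-- ===== Notes on version B (the rewrite author's own statement) =====
-- stated objective: alternative
-- what changed: Replaced the two-level split-on-newlines / split-on-spaces / reverse / join pipeline by a single left-to-right pass that accumulates each run of non-delimiter characters and flushes it reversed at each space or newline, building no intermediate line/word lists.
import Mathlib
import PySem

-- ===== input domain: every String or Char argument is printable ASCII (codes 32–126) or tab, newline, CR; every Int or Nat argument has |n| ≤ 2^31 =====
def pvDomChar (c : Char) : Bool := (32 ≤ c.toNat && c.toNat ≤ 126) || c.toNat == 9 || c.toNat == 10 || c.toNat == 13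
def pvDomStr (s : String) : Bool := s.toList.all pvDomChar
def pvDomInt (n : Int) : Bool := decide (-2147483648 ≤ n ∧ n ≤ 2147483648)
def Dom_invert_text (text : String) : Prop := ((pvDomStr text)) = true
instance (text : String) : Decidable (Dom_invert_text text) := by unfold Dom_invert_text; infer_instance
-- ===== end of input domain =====

-- B replaces the split/reverse/join pipeline by a single pass that flushes each
-- run of non-delimiter characters reversed at every space/newline (alternative
-- decomposition, same behaviour).


-- ===== PORT A =====
-- lines = text.split('\n'); for each line: words = line.split(' '), each word
-- replaced in place by word[::-1] (an index-preserving update = List.map),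
-- ' '.join(words); finally '\n'.join(lines)
def invert_text (text : String) : String :=
  let lines := PySem.Chars.splitOn text.toList ['\n']
  let lines := lines.map (fun line =>
    let words := PySem.Chars.splitOn line [' ']
    let words := words.map (fun w => w.reverse)   -- word[::-1]
    PySem.Chars.join [' '] words)
  String.ofList (PySem.Chars.join ['\n'] lines)

-- ===== PORT B =====
-- one pass: state (out, word); flush word[::-1] at each ' '/'\n' and at the end
def invert_text_alt (text : String) : String :=
  let st := text.toList.foldl
    (fun (st : List Char × List Char) ch =>
      if ch == ' ' || ch == '\n' then (st.1 ++ st.2.reverse ++ [ch], [])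
      else (st.1, st.2 ++ [ch]))
    ([], [])
  String.ofList (st.1 ++ st.2.reverse)

-- ===== PRECONDITION & SPEC =====
def Spec_invert_text (text : String) (out : String) : Prop := out = invert_text_alt text
instance (text : String) (out : String) : Decidable (Spec_invert_text text out) := by unfold Spec_invert_text; infer_instance

-- ===== CLAIM (what is proved, stated in full; the proofs are below) =====
def Claim_equal_invert_text : Prop := ∀ (text : String), Dom_invert_text text → Spec_invert_text text (invert_text text)

-- ===== LEMMAS AND PROOFS =====

-- structural characterisation of splitting on a single character
def splitC (c : Char) : List Char → List (List Char)
  | [] => [[]]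
  | x :: xs =>
    if x = c then [] :: splitC c xs
    else match splitC c xs with
      | [] => [[x]]          -- unreachable: splitC is never []
      | h :: t => (x :: h) :: t

-- canonical middle form: the single pass with pending word w (in input order)
def cRev : List Char → List Char → List Char
  | [], w => w.reverse
  | c :: cs, w =>
    if c = ' ' ∨ c = '\n' then w.reverse ++ c :: cRev cs []
    else cRev cs (w ++ [c])

theorem splitC_ne_nil (c : Char) (l : List Char) : splitC c l ≠ [] := by
  cases l with
  | nil => simp [splitC]
  | cons x xs =>
    simp only [splitC]
    split
    · simp
    · split <;> simp

theorem splitC_cons_eq (c : Char) (xs : List Char) :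
    splitC c (c :: xs) = [] :: splitC c xs := by
  simp [splitC]

theorem splitC_cons_ne (c x : Char) (xs : List Char) (h : x ≠ c) :
    splitC c (x :: xs) = (splitC c xs).modifyHead (x :: ·) := by
  obtain ⟨a, t, e⟩ := List.exists_cons_of_ne_nil (splitC_ne_nil c xs)
  simp only [splitC, if_neg h, e, List.modifyHead]

theorem go_splitC (c : Char) (l : List Char) :
    ∀ (fuel : Nat) (cur : List Char) (acc : List (List Char)), l.length ≤ fuel →
    PySem.Chars.splitOn.go [c] fuel l cur acc
      = acc.reverse ++ (splitC c l).modifyHead (cur.reverse ++ ·) := by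
  induction l with
  | nil =>
    intro fuel cur acc _
    cases fuel <;> simp [PySem.Chars.splitOn.go, splitC]
  | cons x xs ih =>
    intro fuel cur acc hf
    obtain ⟨f, rfl⟩ : ∃ f, fuel = f + 1 := by
      cases fuel with
      | zero => simp at hf
      | succ f => exact ⟨f, rfl⟩
    have hstep : PySem.Chars.splitOn.go [c] (f+1) (x :: xs) cur acc =
        if c = x then PySem.Chars.splitOn.go [c] f xs [] (cur.reverse :: acc)
        else PySem.Chars.splitOn.go [c] f xs (x :: cur) acc := by
      rw [PySem.Chars.splitOn.go]
      by_cases h : c = x <;> simp [List.isPrefixOf, h]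
    have hxs : xs.length ≤ f := by simpa using hf
    obtain ⟨a, t, e⟩ := List.exists_cons_of_ne_nil (splitC_ne_nil c xs)
    rw [hstep]
    by_cases h : c = x
    · rw [if_pos h, ih f [] (cur.reverse :: acc) hxs, ← h, splitC_cons_eq, e]
      simp [List.modifyHead]
    · rw [if_neg h, ih f (x :: cur) acc hxs, splitC_cons_ne c x xs (fun hh => h hh.symm), e]
      simp [List.modifyHead]

theorem splitOn_eq_splitC (c : Char) (l : List Char) :
    PySem.Chars.splitOn l [c] = splitC c l := by
  rw [PySem.Chars.splitOn, go_splitC c l (l.length + 1) [] [] (by omega)]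
  obtain ⟨a, t, e⟩ := List.exists_cons_of_ne_nil (splitC_ne_nil c l)
  simp [e, List.modifyHead]

theorem splitC_append (c : Char) (u l : List Char) (hu : c ∉ u) :
    splitC c (u ++ l) = (splitC c l).modifyHead (u ++ ·) := by
  induction u with
  | nil => cases e : splitC c l <;> simp [List.modifyHead, e]
  | cons x xs ih =>
    simp only [List.mem_cons, not_or] at hu
    obtain ⟨a, t, e⟩ := List.exists_cons_of_ne_nil (splitC_ne_nil c l)
    rw [List.cons_append, splitC_cons_ne c x (xs ++ l) (fun hh => hu.1 hh.symm),
        ih hu.2, e]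
    simp [List.modifyHead]

theorem splitC_of_not_mem (c : Char) (l : List Char) (h : c ∉ l) :
    splitC c l = [l] := by
  have := splitC_append c l [] h
  simpa [splitC, List.modifyHead] using this

theorem join_cons (sep : List Char) (x : List Char) (t : List (List Char)) :
    PySem.Chars.join sep (x :: t) = x ++ t.flatMap (fun y => sep ++ y) := by
  induction t generalizing x with
  | nil => simp [PySem.Chars.join_singleton]
  | cons y t ih => rw [PySem.Chars.join_cons_cons, ih y]; simp

-- A's pipeline on a list of chars
def aChars (cs : List Char) : List Char :=
  PySem.Chars.join ['\n']
    ((splitC '\n' cs).map (fun line =>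
      PySem.Chars.join [' '] ((splitC ' ' line).map (fun w => w.reverse))))

-- line-level: space-free prefix w, then a space
theorem lineF_space (w h : List Char) (hw : ' ' ∉ w) :
    PySem.Chars.join [' '] ((splitC ' ' (w ++ ' ' :: h)).map (fun x => x.reverse))
      = w.reverse ++ ' ' :: PySem.Chars.join [' '] ((splitC ' ' h).map (fun x => x.reverse)) := by
  rw [splitC_append ' ' w (' ' :: h) hw, splitC_cons_eq]
  obtain ⟨a, t, e⟩ := List.exists_cons_of_ne_nil (splitC_ne_nil ' ' h)
  rw [e]
  simp only [List.modifyHead, List.append_nil, List.map_cons]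
  rw [PySem.Chars.join_cons_cons]
  simp

theorem lineF_free (w : List Char) (hw : ' ' ∉ w) :
    PySem.Chars.join [' '] ((splitC ' ' w).map (fun x => x.reverse)) = w.reverse := by
  rw [splitC_of_not_mem ' ' w hw]
  simp [PySem.Chars.join_singleton]

theorem aChars_delim (w rest : List Char) (d : Char) (hd : d = ' ' ∨ d = '\n')
    (hw : ∀ c ∈ w, ¬(c = ' ' ∨ c = '\n')) :
    aChars (w ++ d :: rest) = w.reverse ++ d :: aChars rest := by
  have hn : '\n' ∉ w := fun h => hw _ h (Or.inr rfl)
  have hs : ' ' ∉ w := fun h => hw _ h (Or.inl rfl)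
  obtain ⟨a, t, e⟩ := List.exists_cons_of_ne_nil (splitC_ne_nil '\n' rest)
  rcases hd with rfl | rfl
  · -- d = ' ' : the space extends the first line, inside which it ends the first word
    unfold aChars
    have : w ++ ' ' :: rest = (w ++ [' ']) ++ rest := by simp
    rw [this, splitC_append '\n' (w ++ [' ']) rest (by simp [hn]), e]
    simp only [List.modifyHead, List.map_cons, List.append_assoc, List.singleton_append]
    rw [lineF_space w a hs, join_cons, join_cons]
    simp
  · -- d = '\n' : the newline ends the first line
    unfold aChars
    rw [splitC_append '\n' w ('\n' :: rest) hn, splitC_cons_eq, e]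
    simp only [List.modifyHead, List.append_nil, List.map_cons]
    rw [PySem.Chars.join_cons_cons, lineF_free w hs]
    simp

theorem aChars_free (w : List Char) (hw : ∀ c ∈ w, ¬(c = ' ' ∨ c = '\n')) :
    aChars w = w.reverse := by
  have h1 : '\n' ∉ w := fun h => hw _ h (Or.inr rfl)
  have h2 : ' ' ∉ w := fun h => hw _ h (Or.inl rfl)
  unfold aChars
  rw [splitC_of_not_mem '\n' w h1]
  simp only [List.map_cons, List.map_nil]
  rw [lineF_free w h2, PySem.Chars.join_singleton]

theorem aChars_eq_cRev (cs : List Char) :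
    ∀ w, (∀ c ∈ w, ¬(c = ' ' ∨ c = '\n')) → aChars (w ++ cs) = cRev cs w := by
  induction cs with
  | nil => intro w hw; simpa [cRev] using aChars_free w hw
  | cons c cs ih =>
    intro w hw
    by_cases hc : c = ' ' ∨ c = '\n'
    · rw [cRev, if_pos hc, aChars_delim w cs c hc hw, ← ih [] (by simp)]
      simp
    · rw [cRev, if_neg hc, ← ih (w ++ [c]) ?_]
      · simp
      · intro x hx
        rcases List.mem_append.mp hx with h | h
        · exact hw x h
        · simp only [List.mem_singleton] at h; subst h; exact hc

theorem foldl_eq_cRev (cs : List Char) :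
    ∀ (out w : List Char),
    (let st := cs.foldl
      (fun (st : List Char × List Char) ch =>
        if ch == ' ' || ch == '\n' then (st.1 ++ st.2.reverse ++ [ch], [])
        else (st.1, st.2 ++ [ch])) (out, w)
     st.1 ++ st.2.reverse) = out ++ cRev cs w := by
  induction cs with
  | nil => intro out w; simp [cRev]
  | cons c cs ih =>
    intro out w
    by_cases hc : c = ' ' ∨ c = '\n'
    · have hb : (c == ' ' || c == '\n') = true := by
        rcases hc with h | h <;> simp [h]
      simp only [List.foldl_cons, hb, if_pos, cRev, if_pos hc]
      rw [ih]
      simp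
    · have hb : (c == ' ' || c == '\n') = false := by
        rcases not_or.mp hc with ⟨h1, h2⟩
        simp [h1, h2]
      simp only [List.foldl_cons, hb, Bool.false_eq_true, if_false, cRev, if_neg hc]
      exact ih _ _

-- ===== VERDICT (by name: the statement is the Claim_ definition above) =====
theorem invert_text_spec : Claim_equal_invert_text := by
  intro text _
  unfold Spec_invert_text invert_text invert_text_alt
  simp only [splitOn_eq_splitC]
  have hA : aChars text.toList = cRev text.toList [] :=
    aChars_eq_cRev text.toList [] (by simp)
  have hB := foldl_eq_cRev text.toList [] []
  simp only [List.nil_append] at hB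
  rw [show PySem.Chars.join ['\n']
      ((splitC '\n' text.toList).map (fun line =>
        PySem.Chars.join [' '] ((splitC ' ' line).map (fun w => w.reverse))))
      = aChars text.toList from rfl, hA, ← hB]
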